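-- pv_equiv track=rewrite | github.com/apa-sl/edx-harvardx-cs50p | week2-Loops/plates/plates.py | digits_at_end
-- ===== SOURCE A (Python) =====
-- def digits_at_end(s):
--     ending = None
--
--     # iterate through string to find digit, if found copy ending of the string
--     for i in range(len(s)):
--         if (s[i].isnumeric()):
--             ending = s[i:]
--             break
--
--     # if there is ending with digits
--     if ending is not None:
--         # check if ending starts with 0
--         if ending[0] == "0":
--             return False
--
--         # iterate through ending and check are there only digits
--         for _ in ending:
--             if _.isnumeric() == False:
--                 return False
--     return True
-- ===== SOURCE B (Python) =====
-- def digits_at_end(s):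
--     # back-to-front: peel off the maximal trailing run of numeric characters,
--     # then the string is valid iff the remaining prefix holds no numeric
--     # character and the suffix does not start with '0'.
--     i = len(s)
--     while i > 0 and s[i - 1].isnumeric():
--         i -= 1
--     prefix, suffix = s[:i], s[i:]
--     if any(c.isnumeric() for c in prefix):
--         return False
--     if suffix and suffix[0] == "0":
--         return False
--     return True
-- ===== Notes on version B (the rewrite author's own statement) =====
-- stated objective: alternative
-- what changed: B scans back-to-front: it peels the maximal trailing numeric run off the end and then checks that the remaining prefix has no numeric character and that the run has no leading zero, instead of A's front-to-back search for the first digit followed by validation of the copied suffix.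
import Mathlib
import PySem

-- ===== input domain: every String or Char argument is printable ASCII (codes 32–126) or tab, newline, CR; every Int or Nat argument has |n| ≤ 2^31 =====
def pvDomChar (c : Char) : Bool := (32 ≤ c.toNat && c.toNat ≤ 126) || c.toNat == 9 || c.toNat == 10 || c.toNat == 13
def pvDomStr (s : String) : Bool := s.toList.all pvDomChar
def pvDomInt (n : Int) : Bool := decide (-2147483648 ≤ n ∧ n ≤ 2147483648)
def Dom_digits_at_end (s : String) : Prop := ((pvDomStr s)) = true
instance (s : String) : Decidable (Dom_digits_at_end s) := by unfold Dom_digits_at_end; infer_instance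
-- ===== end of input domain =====

-- B validates "digits only at the end, no leading zero" back-to-front: it peels the
-- maximal trailing digit run off the end and checks the remaining prefix holds no
-- digit, instead of A's front-to-back find-first-digit-then-validate pass
-- (objective: alternative decomposition, same cost).
-- '.isnumeric()' is ported as PySem.Chars.isdigit, exact on the ASCII domain.

-- ===== PORT A =====
-- the 'for i in range(len(s)) … break' loop: recursion over the tail;
-- 's[i:]' is the current suffix 'c :: rest'
def pvFindEnding : List Char → Option (List Char)
  | [] => none
  | c :: rest =>
    if PySem.Chars.isdigit c then some (c :: rest) else pvFindEnding rest

def digits_at_end (s : String) : Bool :=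
  match pvFindEnding s.toList with
  | none => true
  | some ending =>
    if PySem.List.pyGet? ending 0 == some '0' then false
    else ending.all (fun c => PySem.Chars.isdigit c)

-- ===== PORT B =====
-- the backwards 'while' loop = takeWhile/dropWhile on the reversed characters
def digits_at_end_alt (s : String) : Bool :=
  let r := s.toList.reverse
  let pre := (r.dropWhile (fun c => PySem.Chars.isdigit c)).reverse
  let suf := (r.takeWhile (fun c => PySem.Chars.isdigit c)).reverse
  if pre.any (fun c => PySem.Chars.isdigit c) then false
  else if suf.head? == some '0' then false
  else true

-- ===== PRECONDITION & SPEC =====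
def Spec_digits_at_end (s : String) (out : Bool) : Prop := out = digits_at_end_alt s
instance (s : String) (out : Bool) : Decidable (Spec_digits_at_end s out) := by unfold Spec_digits_at_end; infer_instance

-- ===== CLAIM (what is proved, stated in full; the proofs are below) =====
def Claim_equal_digits_at_end : Prop := ∀ (s : String), Dom_digits_at_end s → Spec_digits_at_end s (digits_at_end s)

-- ===== LEMMAS AND PROOFS =====

-- proof-only reformulations of the two ports over a generic predicate d
def pvACore (d : Char → Bool) (l : List Char) : Bool :=
  match l.dropWhile (fun c => !d c) with
  | [] => true
  | c :: t => if c == '0' then false else (c :: t).all d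

def pvBCore (d : Char → Bool) (l : List Char) : Bool :=
  if ((l.reverse.dropWhile d).reverse).any d then false
  else if ((l.reverse.takeWhile d).reverse).head? == some '0' then false
  else true

theorem pv_takeWhile_all_false {p : Char → Bool} {l : List Char}
    (h : ∀ x ∈ l, p x = false) : l.takeWhile p = [] := by
  cases l with
  | nil => rfl
  | cons c t => simp [List.takeWhile, h c (by simp)]

theorem pv_dropWhile_all_false {p : Char → Bool} {l : List Char}
    (h : ∀ x ∈ l, p x = false) : l.dropWhile p = l := by
  cases l with
  | nil => rfl
  | cons c t => simp [List.dropWhile, h c (by simp)]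

theorem pv_takeWhile_append_all_true {p : Char → Bool} {a b : List Char}
    (h : ∀ x ∈ a, p x = true) : (a ++ b).takeWhile p = a ++ b.takeWhile p := by
  induction a with
  | nil => rfl
  | cons c t ih =>
    simp only [List.cons_append, List.takeWhile, h c (by simp)]
    simp [ih (fun x hx => h x (by simp [hx]))]

theorem pv_dropWhile_append_all_true {p : Char → Bool} {a b : List Char}
    (h : ∀ x ∈ a, p x = true) : (a ++ b).dropWhile p = b.dropWhile p := by
  induction a with
  | nil => rfl
  | cons c t ih =>
    simp only [List.cons_append, List.dropWhile, h c (by simp)]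
    exact ih (fun x hx => h x (by simp [hx]))

theorem pv_dropWhile_head {p : Char → Bool} {l : List Char} {c : Char} {t : List Char}
    (h : l.dropWhile p = c :: t) : p c = false := by
  induction l with
  | nil => simp at h
  | cons a r ih =>
    by_cases ha : p a
    · exact ih (by simpa [List.dropWhile, ha] using h)
    · simp [List.dropWhile, ha] at h
      simpa [h.1] using ha

-- pvFindEnding is dropWhile of the negated predicate (none on empty result)
theorem pv_findEnding_eq (l : List Char) :
    pvFindEnding l =
      (if l.dropWhile (fun c => !PySem.Chars.isdigit c) = [] then none
       else some (l.dropWhile (fun c => !PySem.Chars.isdigit c))) := by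
  induction l with
  | nil => rfl
  | cons c t ih =>
    by_cases h : PySem.Chars.isdigit c
    · simp [pvFindEnding, List.dropWhile, h]
    · simp only [pvFindEnding, ih, List.dropWhile, h]
      simp

theorem pv_A_eq (s : String) :
    digits_at_end s = pvACore PySem.Chars.isdigit s.toList := by
  unfold digits_at_end pvACore
  rw [pv_findEnding_eq]
  cases h : s.toList.dropWhile (fun c => !PySem.Chars.isdigit c) with
  | nil => simp
  | cons c t =>
    simp only [reduceCtorEq]
    simp [PySem.List.pyGet?, PySem.List.pyIdx?]

theorem pv_B_eq (s : String) :
    digits_at_end_alt s = pvBCore PySem.Chars.isdigit s.toList := rfl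

-- the heart: on any character list the two passes agree
theorem pv_core (d : Char → Bool) (l : List Char) : pvACore d l = pvBCore d l := by
  have hwl : ∀ x ∈ l.takeWhile (fun c => !d c), d x = false := by
    intro x hx; simpa using List.mem_takeWhile_imp hx
  by_cases hall : ∀ x ∈ l.dropWhile (fun c => !d c), d x = true
  · -- the suffix found by A is all digits; it coincides with B's trailing run
    have hrev : l.reverse
        = (l.dropWhile (fun c => !d c)).reverse ++ (l.takeWhile (fun c => !d c)).reverse := by
      conv_lhs => rw [← List.takeWhile_append_dropWhile (p := fun c => !d c) (l := l)]
      rw [List.reverse_append]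
    have htk : l.reverse.takeWhile d = (l.dropWhile (fun c => !d c)).reverse := by
      rw [hrev, pv_takeWhile_append_all_true (by simpa using hall),
        pv_takeWhile_all_false (by simpa using hwl), List.append_nil]
    have hdp : l.reverse.dropWhile d = (l.takeWhile (fun c => !d c)).reverse := by
      rw [hrev, pv_dropWhile_append_all_true (by simpa using hall),
        pv_dropWhile_all_false (by simpa using hwl)]
    unfold pvBCore
    rw [htk, hdp, List.reverse_reverse, List.reverse_reverse]
    have hnoany : (l.takeWhile (fun c => !d c)).any d = false := by
      simp only [List.any_eq_false]
      intro x hx; simp [hwl x hx]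
    rw [hnoany]
    simp only [Bool.false_eq_true, if_false]
    unfold pvACore
    cases hcase : l.dropWhile (fun c => !d c) with
    | nil => simp
    | cons c t =>
      rw [hcase] at hall
      have hct : (c :: t).all d = true := List.all_eq_true.mpr hall
      by_cases hc : c = '0' <;> simp [hc, hct]
  · -- the suffix found by A contains a non-digit: both sides are false
    push Not at hall
    obtain ⟨x, hxe, hxd⟩ := hall
    cases hcase : l.dropWhile (fun c => !d c) with
    | nil => rw [hcase] at hxe; simp at hxe
    | cons c t =>
      rw [hcase] at hxe
      have hdc : d c = true := by
        have := pv_dropWhile_head hcase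
        simpa using this
      have hax : pvACore d l = false := by
        unfold pvACore; rw [hcase]
        have hne : (c :: t).all d = false :=
          List.all_eq_false.mpr ⟨x, hxe, by simpa using hxd⟩
        by_cases hc : c = '0' <;> simp [hc, hne]
      rw [hax]
      by_cases hpre : ((l.reverse.dropWhile d).reverse).any d = true
      · unfold pvBCore; rw [hpre]; simp
      · exfalso
        have hpref : ∀ y ∈ (l.reverse.dropWhile d).reverse, d y = false := by
          simpa [List.any_eq_false] using hpre
        have hsuf : ∀ y ∈ (l.reverse.takeWhile d).reverse, d y = true := by
          intro y hy; exact List.mem_takeWhile_imp (List.mem_reverse.mp hy)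
        have hsplit2 :
            (l.reverse.dropWhile d).reverse ++ (l.reverse.takeWhile d).reverse = l := by
          rw [← List.reverse_append, List.takeWhile_append_dropWhile, List.reverse_reverse]
        have hsame : l.dropWhile (fun c => !d c) = (l.reverse.takeWhile d).reverse := by
          conv_lhs => rw [← hsplit2]
          rw [pv_dropWhile_append_all_true (by intro y hy; simp [hpref y hy]),
            pv_dropWhile_all_false (by intro y hy; simp [hsuf y hy])]
        rw [hcase] at hsame
        have : d x = true := hsuf x (hsame ▸ hxe)
        exact hxd this

-- ===== VERDICT (by name: the statement is the Claim_ definition above) =====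
theorem digits_at_end_spec : Claim_equal_digits_at_end := by
  intro s _
  unfold Spec_digits_at_end
  rw [pv_A_eq, pv_B_eq, pv_core]
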